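-- pv_equiv track=rewrite | github.com/sashu2310/cartograph | cartograph/v2/mcp/server.py | _resolve_qname
-- ===== SOURCE A (Python) =====
-- from typing import Any
--
-- def _resolve_qname(functions: dict[str, Any], name: str) -> str | None:
--     """exact → suffix → substring. First hit wins."""
--     if name in functions:
--         return name
--     for qn in functions:
--         if qn.endswith(f".{name}"):
--             return qn
--     needle = name.lower()
--     for qn in functions:
--         if needle in qn.lower():
--             return qn
--     return None
-- ===== SOURCE B (Python) =====
-- def _resolve_qname(functions, name):
--     """Rank every key by match quality (0 exact, 1 suffix, 2 substring, 3 none)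
--     and take the stable minimum; min() keeps the first key on ties."""
--     needle = name.lower()
--
--     def tier(qn):
--         if qn == name:
--             return 0
--         if qn.endswith("." + name):
--             return 1
--         if needle in qn.lower():
--             return 2
--         return 3
--
--     best = min(functions, key=tier, default=None)
--     if best is not None and tier(best) < 3:
--         return best
--     return None
-- ===== Notes on version B (the rewrite author's own statement) =====
-- stated objective: alternative
-- what changed: A's three sequential passes (exact membership, suffix scan, substring scan) are replaced by a scoring scheme: every key gets a match tier (0 exact, 1 suffix, 2 substring, 3 none) and the answer is the stable minimum of the keys under that tier, which preserves priority and first-in-order tie-breaking.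
import Mathlib
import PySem

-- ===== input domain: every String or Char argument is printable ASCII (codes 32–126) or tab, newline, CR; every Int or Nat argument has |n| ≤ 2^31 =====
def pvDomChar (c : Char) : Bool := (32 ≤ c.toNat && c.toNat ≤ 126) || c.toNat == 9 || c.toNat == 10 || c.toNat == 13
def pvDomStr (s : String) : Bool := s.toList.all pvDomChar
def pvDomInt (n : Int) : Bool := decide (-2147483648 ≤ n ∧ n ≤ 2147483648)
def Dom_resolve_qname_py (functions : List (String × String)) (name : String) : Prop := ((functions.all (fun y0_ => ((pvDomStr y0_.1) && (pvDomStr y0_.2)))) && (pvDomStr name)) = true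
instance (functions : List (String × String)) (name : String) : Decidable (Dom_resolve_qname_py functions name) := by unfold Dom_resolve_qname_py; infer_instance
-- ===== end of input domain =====

-- ===== PORT A =====
-- header: B replaces A's three sequential passes by a per-key match tier (0 exact, 1 suffix,
-- 2 substring, 3 none) and one stable minimum under that tier; objective: alternative algorithm.

-- 'for qn in functions: if qn.endswith(f".{name}"): return qn'
def pvASuffix (keys : List String) (name : String) : Option String :=
  match keys with
  | [] => none
  | qn :: rest => if PySem.Str.endswith qn ("." ++ name) then some qn else pvASuffix rest name

-- 'for qn in functions: if needle in qn.lower(): return qn'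
def pvASub (keys : List String) (needle : String) : Option String :=
  match keys with
  | [] => none
  | qn :: rest => if PySem.Str.isIn needle (PySem.Str.lower qn) then some qn else pvASub rest needle

def resolve_qname_py (functions : List (String × String)) (name : String) : Option String :=
  if (functions.map Prod.fst).contains name then some name
  else
    match pvASuffix (functions.map Prod.fst) name with
    | some qn => some qn
    | none => pvASub (functions.map Prod.fst) (PySem.Str.lower name)

-- ===== PORT B =====
-- Source B's tier(qn): match quality of one key
def pvTier (name needle qn : String) : Nat :=
  if qn == name then 0
  else if PySem.Str.endswith qn ("." ++ name) then 1
  else if PySem.Str.isIn needle (PySem.Str.lower qn) then 2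
  else 3

-- Source B: best = min(functions, key=tier, default=None); return best if tier(best) < 3 else None
def resolve_qname_py_alt (functions : List (String × String)) (name : String) : Option String :=
  match PySem.List.min? (functions.map Prod.fst) (pvTier name (PySem.Str.lower name)) with
  | none => none
  | some best => if pvTier name (PySem.Str.lower name) best < 3 then some best else none

-- ===== PRECONDITION & SPEC =====
def Spec_resolve_qname_py (functions : List (String × String)) (name : String) (out : Option String) : Prop := out = resolve_qname_py_alt functions name
instance (functions : List (String × String)) (name : String) (out : Option String) : Decidable (Spec_resolve_qname_py functions name out) := by unfold Spec_resolve_qname_py; infer_instance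

-- ===== CLAIM (what is proved, stated in full; the proofs are below) =====
def Claim_equal_resolve_qname_py : Prop := ∀ (functions : List (String × String)) (name : String), Dom_resolve_qname_py functions name → Spec_resolve_qname_py functions name (resolve_qname_py functions name)

-- ===== LEMMAS AND PROOFS =====

-- the folding step of min?
def pvStep (t : String → Nat) (acc : Option String) (x : String) : Option String :=
  match acc with
  | none => some x
  | some m => if t x < t m then some x else some m

theorem pvMin_eq_foldl (xs : List String) (t : String → Nat) :
    PySem.List.min? xs t = xs.foldl (pvStep t) none := by
  simp only [PySem.List.min?]
  congr 1
  funext acc x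
  cases acc <;> rfl

-- an accumulator not beaten by anything in the list survives
theorem pvFoldl_stay (t : String → Nat) (keys : List String) (m : String)
    (h : ∀ x ∈ keys, ¬ t x < t m) :
    keys.foldl (pvStep t) (some m) = some m := by
  induction keys with
  | nil => rfl
  | cons q rest ih =>
    have hq : ¬ t q < t m := h q (by simp)
    simp only [List.foldl, pvStep, if_neg hq]
    exact ih (fun x hx => h x (by simp [hx]))

-- predicates agreeing on members give the same find?
theorem pvFind?_congr {p q : String → Bool} (keys : List String)
    (h : ∀ x ∈ keys, p x = q x) : keys.find? p = keys.find? q := by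
  induction keys with
  | nil => rfl
  | cons a rest ih =>
    have ha : p a = q a := h a (by simp)
    simp only [List.find?, ha]
    cases q a with
    | true => rfl
    | false => exact ih (fun x hx => h x (by simp [hx]))

-- the fold of min? finds the FIRST element of the minimal tier v
theorem pvFoldl_first_min (t : String → Nat) (v : Nat) :
    ∀ (keys : List String) (acc : Option String),
    (∀ m, acc = some m → v < t m) →
    (∀ x ∈ keys, v ≤ t x) →
    (∃ x ∈ keys, t x = v) →
    keys.foldl (pvStep t) acc = keys.find? (fun x => t x == v) := by
  intro keys
  induction keys with
  | nil => intro acc _ _ hex; simp at hex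
  | cons q rest ih =>
    intro acc hacc hge hex
    by_cases hq : t q = v
    · have hstep : (pvStep t acc q) = some q := by
        cases acc with
        | none => rfl
        | some m =>
          have := hacc m rfl
          simp [pvStep, hq, this]
      simp only [List.foldl, hstep, List.find?, hq, beq_self_eq_true]
      exact pvFoldl_stay t rest q (fun x hx => by
        have := hge x (by simp [hx]); omega)
    · have hvq : v < t q := lt_of_le_of_ne (hge q (by simp)) (fun h => hq h.symm)
      have hstep : ∀ m', pvStep t acc q = some m' → v < t m' := by
        intro m' hm'
        cases acc with
        | none =>
          simp only [pvStep] at hm'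
          injection hm' with h'
          subst h'
          omega
        | some m =>
          have hm := hacc m rfl
          simp only [pvStep] at hm'
          split at hm' <;> (injection hm' with h') <;> subst h' <;> omega
      have hex' : ∃ x ∈ rest, t x = v := by
        rcases hex with ⟨x, hx, hxv⟩
        rcases List.mem_cons.mp hx with h | h
        · exact absurd (h ▸ hxv) hq
        · exact ⟨x, h, hxv⟩
      have hfind : (fun x => t x == v) q = false := by simp [hq]
      simp only [List.foldl, List.find?, hfind]
      exact ih _ hstep (fun x hx => hge x (by simp [hx])) hex'

-- tier-3-only lists fold to nothing useful
theorem pvFoldl_all3 (t : String → Nat) :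
    ∀ (keys : List String) (acc : Option String),
    (acc = none ∨ ∃ m, acc = some m ∧ t m = 3) →
    (∀ x ∈ keys, t x = 3) →
    (keys.foldl (pvStep t) acc = none ∨
      ∃ m, keys.foldl (pvStep t) acc = some m ∧ t m = 3) := by
  intro keys
  induction keys with
  | nil => intro acc hacc _; simpa using hacc
  | cons q rest ih =>
    intro acc hacc h3
    have hq : t q = 3 := h3 q (by simp)
    have hacc' : (pvStep t acc q = none) ∨ ∃ m, pvStep t acc q = some m ∧ t m = 3 := by
      rcases hacc with h | ⟨m, hm, hm3⟩
      · subst h; right; exact ⟨q, rfl, hq⟩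
      · subst hm; simp only [pvStep]; split
        · right; exact ⟨q, rfl, hq⟩
        · right; exact ⟨m, rfl, hm3⟩
    simpa only [List.foldl] using ih _ hacc' (fun x hx => h3 x (by simp [hx]))

-- A's passes are find?s
theorem pvASuffix_eq_find (keys : List String) (name : String) :
    pvASuffix keys name = keys.find? (fun qn => PySem.Str.endswith qn ("." ++ name)) := by
  induction keys with
  | nil => rfl
  | cons q rest ih =>
    simp only [pvASuffix, List.find?]
    split <;> rename_i h <;> simp_all

theorem pvASub_eq_find (keys : List String) (needle : String) :
    pvASub keys needle = keys.find? (fun qn => PySem.Str.isIn needle (PySem.Str.lower qn)) := by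
  induction keys with
  | nil => rfl
  | cons q rest ih =>
    simp only [pvASub, List.find?]
    split <;> rename_i h <;> simp_all

theorem pvTier_self (name needle : String) : pvTier name needle name = 0 := by
  simp [pvTier]

theorem pvTier_eq_zero (name needle qn : String) (h : pvTier name needle qn = 0) :
    qn = name := by
  simp only [pvTier] at h
  split at h
  · rename_i heq; simpa using heq
  · split at h
    · omega
    · split at h <;> omega

-- the whole equivalence, over the key list
theorem pvMain (keys : List String) (name : String) :
    (if keys.contains name then some name
     else match pvASuffix keys name with
          | some qn => some qn
          | none => pvASub keys (PySem.Str.lower name)) =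
    (match PySem.List.min? keys (pvTier name (PySem.Str.lower name)) with
     | none => none
     | some best => if pvTier name (PySem.Str.lower name) best < 3 then some best
                    else none) := by
  by_cases h0 : name ∈ keys
  · -- exact hit: min? returns a tier-0 element, which must be name itself
    have hne : keys ≠ [] := by intro h; simp [h] at h0
    obtain ⟨m, hm⟩ : ∃ m, PySem.List.min? keys (pvTier name (PySem.Str.lower name)) = some m := by
      cases hc : PySem.List.min? keys (pvTier name (PySem.Str.lower name)) with
      | none => exact absurd ((PySem.List.min?_eq_none_iff _ _).mp hc) hne
      | some m => exact ⟨m, rfl⟩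
    have hle := PySem.List.min?_isMin hm name h0
    rw [pvTier_self] at hle
    have hm0 : pvTier name (PySem.Str.lower name) m = 0 := Nat.le_zero.mp hle
    have hmname : m = name := pvTier_eq_zero _ _ _ hm0
    simp [hm, List.contains_eq_mem, h0, hmname, pvTier_self]
  · -- no exact hit anywhere
    have hnot0 : ∀ x ∈ keys, x ≠ name := fun x hx h => h0 (h ▸ hx)
    have htx : ∀ x ∈ keys, pvTier name (PySem.Str.lower name) x =
        (if PySem.Str.endswith x ("." ++ name) then 1
         else if PySem.Str.isIn (PySem.Str.lower name) (PySem.Str.lower x) then 2 else 3) := by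
      intro x hx
      simp [pvTier, hnot0 x hx]
    have hcont : keys.contains name = false := by simpa using h0
    rw [pvMin_eq_foldl]
    by_cases h1 : ∃ x ∈ keys, PySem.Str.endswith x ("." ++ name) = true
    · -- suffix phase wins: minimal tier is 1, first such key
      have hge : ∀ x ∈ keys, 1 ≤ pvTier name (PySem.Str.lower name) x := by
        intro x hx; rw [htx x hx]; split
        · omega
        · split <;> omega
      have hex : ∃ x ∈ keys, pvTier name (PySem.Str.lower name) x = 1 := by
        rcases h1 with ⟨x, hx, hsx⟩
        exact ⟨x, hx, by rw [htx x hx, if_pos hsx]⟩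
      rw [pvFoldl_first_min _ 1 keys none (by simp) hge hex]
      have hfe : keys.find? (fun x => pvTier name (PySem.Str.lower name) x == 1) =
          keys.find? (fun qn => PySem.Str.endswith qn ("." ++ name)) := by
        apply pvFind?_congr
        intro x hx
        rw [htx x hx]
        split
        · simp_all
        · split <;> simp_all
      rw [hfe, ← pvASuffix_eq_find]
      rcases h1 with ⟨x, hx, hsx⟩
      cases hsfx : pvASuffix keys name with
      | none =>
        rw [pvASuffix_eq_find] at hsfx
        have := List.find?_eq_none.mp hsfx x hx
        simp [PySem.Str.endswith] at hsx
        simp [hsx] at this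
      | some q =>
        have hq1 : pvTier name (PySem.Str.lower name) q = 1 := by
          rw [pvASuffix_eq_find] at hsfx
          have hmem := List.mem_of_find?_eq_some hsfx
          have hpq := List.find?_some hsfx
          rw [htx q hmem, if_pos (by simpa using hpq)]
        simp [hq1, h0]
    · -- no suffix anywhere
      push Not at h1
      have hns : ∀ x ∈ keys, PySem.Chars.endswith x.toList ('.' :: name.toList) = false := by
        intro x hx
        have h := h1 x hx
        simp [PySem.Str.endswith] at h
        simpa using h
      have hsfx : pvASuffix keys name = none := by
        rw [pvASuffix_eq_find]
        apply List.find?_eq_none.mpr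
        intro x hx; simp [hns x hx]
      have htx2 : ∀ x ∈ keys, pvTier name (PySem.Str.lower name) x =
          (if PySem.Str.isIn (PySem.Str.lower name) (PySem.Str.lower x) then 2 else 3) := by
        intro x hx; rw [htx x hx, if_neg (by simp [hns x hx])]
      by_cases h2 : ∃ x ∈ keys, PySem.Str.isIn (PySem.Str.lower name) (PySem.Str.lower x) = true
      · -- substring phase wins: minimal tier is 2, first such key
        have hge : ∀ x ∈ keys, 2 ≤ pvTier name (PySem.Str.lower name) x := by
          intro x hx; rw [htx2 x hx]; split <;> omega
        have hex : ∃ x ∈ keys, pvTier name (PySem.Str.lower name) x = 2 := by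
          rcases h2 with ⟨x, hx, hsx⟩
          exact ⟨x, hx, by rw [htx2 x hx, if_pos hsx]⟩
        rw [pvFoldl_first_min _ 2 keys none (by simp) hge hex]
        have hfe : keys.find? (fun x => pvTier name (PySem.Str.lower name) x == 2) =
            keys.find? (fun qn => PySem.Str.isIn (PySem.Str.lower name) (PySem.Str.lower qn)) := by
          apply pvFind?_congr
          intro x hx
          rw [htx2 x hx]
          split <;> simp_all
        rw [hfe, ← pvASub_eq_find]
        rcases h2 with ⟨x, hx, hsx⟩
        cases hsub : pvASub keys (PySem.Str.lower name) with
        | none =>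
          rw [pvASub_eq_find] at hsub
          have := List.find?_eq_none.mp hsub x hx
          simp [PySem.Str.isIn] at hsx
          simp [hsx] at this
        | some q =>
          have hq2 : pvTier name (PySem.Str.lower name) q = 2 := by
            rw [pvASub_eq_find] at hsub
            have hmem := List.mem_of_find?_eq_some hsub
            have hpq := List.find?_some hsub
            rw [htx2 q hmem, if_pos (by simpa using hpq)]
          simp [hsfx, hq2, h0]
      · -- nothing matches: everything is tier 3
        push Not at h2
        have h3 : ∀ x ∈ keys, pvTier name (PySem.Str.lower name) x = 3 := by
          intro x hx
          rw [htx2 x hx, if_neg ?_]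
          cases h : PySem.Str.isIn (PySem.Str.lower name) (PySem.Str.lower x)
          · simp
          · exact absurd h (h2 x hx)
        have hsub : pvASub keys (PySem.Str.lower name) = none := by
          rw [pvASub_eq_find]
          apply List.find?_eq_none.mpr
          intro x hx
          cases h : PySem.Str.isIn (PySem.Str.lower name) (PySem.Str.lower x)
          · simp
          · exact absurd h (h2 x hx)
        rcases pvFoldl_all3 _ keys none (Or.inl rfl) h3 with hfn | ⟨m, hfm, hm3⟩
        · simp [hsfx, hsub, hfn, h0]
        · simp [hsfx, hsub, hfm, hm3, h0]

-- ===== VERDICT (by name: the statement is the Claim_ definition above) =====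
theorem resolve_qname_py_spec : Claim_equal_resolve_qname_py := by
  intro functions name _
  unfold Spec_resolve_qname_py resolve_qname_py resolve_qname_py_alt
  exact pvMain (functions.map Prod.fst) name
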